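-- pv_equiv track=rewrite | github.com/sun-huangqingbo/active-matrix-completion | adaptive_image.py | Count_Col_Score
-- ===== SOURCE A (Python) =====
-- def Count_Col_Score(col, col2, panelty, currdata):
--     score = 0
--     same = 0
--     conflict = 1
--     for row in currdata:
--         if row[col] != -1 and row[col2] != -1 and row[col] == row[col2]:
--             score += 1
--             same += 1
--         if row[col] != -1 and row[col2] != -1 and row[col] != row[col2]:
--             score -= panelty
--             conflict+=1
--     return score
-- ===== SOURCE B (Python) =====
-- def Count_Col_Score(col, col2, panelty, currdata):
--     # Divide-and-conquer over the row index range: the score is additive over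
--     # rows, so split the range in half, solve each half, and add the results.
--     def solve(lo, hi):
--         if hi <= lo:
--             return 0
--         if hi == lo + 1:
--             row = currdata[lo]
--             a, b = row[col], row[col2]
--             if a == -1 or b == -1:
--                 return 0
--             return 1 if a == b else -panelty
--         mid = (lo + hi) // 2
--         return solve(lo, mid) + solve(mid, hi)
--     return solve(0, len(currdata))
-- ===== Notes on version B (the rewrite author's own statement) =====
-- stated objective: alternative
-- what changed: Replaces A's single stateful left-to-right loop (with dead same/conflict accumulators) by a divide-and-conquer recursion over the row index range: the range is split in half recursively and each singleton row is scored independently as 0, 1 or -panelty, partial scores being summed; correct because the score is additive over rows. Pre_ excludes inputs where col or col2 is out of range for some row, including cases where A's short-circuit 'and' skips evaluating row[col2] (because row[col] == -1) and so returns while B's eager indexing raises.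
-- outside the precondition, e.g. on Count_Col_Score(1, 2, -1, [[-2, -1], [1, -1]]): A returns 0, B raises IndexError
import Mathlib
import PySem

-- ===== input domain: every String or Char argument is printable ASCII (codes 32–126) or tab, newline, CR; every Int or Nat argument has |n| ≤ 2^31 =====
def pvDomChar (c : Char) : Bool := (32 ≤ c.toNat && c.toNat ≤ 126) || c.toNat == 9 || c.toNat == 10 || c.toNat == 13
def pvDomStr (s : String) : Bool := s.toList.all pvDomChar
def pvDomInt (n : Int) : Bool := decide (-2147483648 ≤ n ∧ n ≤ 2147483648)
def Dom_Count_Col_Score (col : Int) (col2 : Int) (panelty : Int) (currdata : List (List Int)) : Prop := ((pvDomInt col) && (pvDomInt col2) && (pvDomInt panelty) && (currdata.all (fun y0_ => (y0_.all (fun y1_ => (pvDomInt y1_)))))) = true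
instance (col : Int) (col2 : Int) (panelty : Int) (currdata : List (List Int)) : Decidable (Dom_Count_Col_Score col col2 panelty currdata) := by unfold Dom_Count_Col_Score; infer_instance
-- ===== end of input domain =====

-- B replaces A's single stateful left-to-right loop (with dead same/conflict accumulators)
-- by a divide-and-conquer recursion over the row index range (objective: alternative).


-- ===== PORT A =====
-- state = (score, same, conflict); row[col] via pyGetD, exact under Pre_ (InRange)
def Count_Col_Score (col : Int) (col2 : Int) (panelty : Int) (currdata : List (List Int)) : Int :=
  (currdata.foldl (fun (st : Int × Int × Int) row =>
      let a := PySem.List.pyGetD row col 0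
      let b := PySem.List.pyGetD row col2 0
      let st1 := if a ≠ -1 ∧ b ≠ -1 ∧ a = b then (st.1 + 1, st.2.1 + 1, st.2.2) else st
      if a ≠ -1 ∧ b ≠ -1 ∧ a ≠ b then (st1.1 - panelty, st1.2.1, st1.2.2 + 1) else st1)
    (0, 0, 1)).1

-- ===== PORT B =====
-- divide-and-conquer helper 'solve' of Source B; currdata[lo] via getD (lo < length at every
-- reachable call), row[col] via pyGetD, exact under Pre_ (InRange)
def ccsSolve (col : Int) (col2 : Int) (panelty : Int) (currdata : List (List Int)) (lo hi : Nat) : Int :=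
  if hi ≤ lo then 0
  else if hi = lo + 1 then
    let row := currdata.getD lo []
    let a := PySem.List.pyGetD row col 0
    let b := PySem.List.pyGetD row col2 0
    if a = -1 ∨ b = -1 then 0
    else if a = b then 1 else -panelty
  else
    ccsSolve col col2 panelty currdata lo ((lo + hi) / 2) +
    ccsSolve col col2 panelty currdata ((lo + hi) / 2) hi
termination_by hi - lo
decreasing_by all_goals omega

def Count_Col_Score_alt (col : Int) (col2 : Int) (panelty : Int) (currdata : List (List Int)) : Int :=
  ccsSolve col col2 panelty currdata 0 currdata.length

-- ===== PRECONDITION & SPEC =====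
-- Pre_ excludes inputs where col or col2 is out of range for some row: there Python A raises
-- IndexError, except when short-circuit 'and' skips row[col2] (row[col] == -1), where A still
-- returns while B's eager indexing raises.
def Pre_Count_Col_Score (col : Int) (col2 : Int) (panelty : Int) (currdata : List (List Int)) : Prop :=
  ∀ row ∈ currdata, PySem.Raise.InRange row.length col ∧ PySem.Raise.InRange row.length col2
instance (col : Int) (col2 : Int) (panelty : Int) (currdata : List (List Int)) : Decidable (Pre_Count_Col_Score col col2 panelty currdata) := by unfold Pre_Count_Col_Score; infer_instance
def pvWitness_Count_Col_Score : Int × Int × Int × List (List Int) := (0, 1, 2, [[3, 3], [3, 4], [-1, 5]])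
def Spec_Count_Col_Score (col : Int) (col2 : Int) (panelty : Int) (currdata : List (List Int)) (out : Int) : Prop := out = Count_Col_Score_alt col col2 panelty currdata
instance (col : Int) (col2 : Int) (panelty : Int) (currdata : List (List Int)) (out : Int) : Decidable (Spec_Count_Col_Score col col2 panelty currdata out) := by unfold Spec_Count_Col_Score; infer_instance

-- ===== CLAIM (what is proved, stated in full; the proofs are below) =====
def Claim_equal_Count_Col_Score : Prop := ∀ (col : Int) (col2 : Int) (panelty : Int) (currdata : List (List Int)), Dom_Count_Col_Score col col2 panelty currdata → Pre_Count_Col_Score col col2 panelty currdata → Spec_Count_Col_Score col col2 panelty currdata (Count_Col_Score col col2 panelty currdata)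

-- ===== LEMMAS AND PROOFS =====

-- per-row contribution to the score
def ccsContrib (col col2 panelty : Int) (row : List Int) : Int :=
  let a := PySem.List.pyGetD row col 0
  let b := PySem.List.pyGetD row col2 0
  if a = -1 ∨ b = -1 then 0
  else if a = b then 1 else -panelty

-- A's foldl computes the sum of per-row contributions
lemma count_col_score_foldl (col col2 panelty : Int) (l : List (List Int)) (s x y : Int) :
    (l.foldl (fun (st : Int × Int × Int) row =>
        let a := PySem.List.pyGetD row col 0
        let b := PySem.List.pyGetD row col2 0
        let st1 := if a ≠ -1 ∧ b ≠ -1 ∧ a = b then (st.1 + 1, st.2.1 + 1, st.2.2) else st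
        if a ≠ -1 ∧ b ≠ -1 ∧ a ≠ b then (st1.1 - panelty, st1.2.1, st1.2.2 + 1) else st1)
      (s, x, y)).1
    = s + (l.map (ccsContrib col col2 panelty)).sum := by
  induction l generalizing s x y with
  | nil => simp
  | cons row t ih =>
    simp only [List.foldl_cons, List.map_cons, List.sum_cons]
    set a := PySem.List.pyGetD row col 0 with ha
    set b := PySem.List.pyGetD row col2 0 with hb
    have hc : ccsContrib col col2 panelty row =
        if a = -1 ∨ b = -1 then 0 else if a = b then 1 else -panelty := by
      simp [ccsContrib, ← ha, ← hb]
    by_cases h1 : a ≠ -1 ∧ b ≠ -1 ∧ a = b <;> by_cases h2 : a ≠ -1 ∧ b ≠ -1 ∧ a ≠ b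
    · exact absurd h1.2.2 h2.2.2
    · simp only [if_pos h1, if_neg h2, ih, hc]
      rw [if_neg (by tauto), if_pos h1.2.2]; ring
    · simp only [if_neg h1, if_pos h2, ih, hc]
      rw [if_neg (by tauto), if_neg h2.2.2]; ring
    · simp only [if_neg h1, if_neg h2, ih, hc]
      rw [if_pos (by tauto)]; ring

-- B's divide-and-conquer computes the same sum over the slice [lo, hi)
lemma ccsSolve_eq (col col2 panelty : Int) (currdata : List (List Int)) :
    ∀ n lo hi, hi - lo = n → hi ≤ currdata.length →
    ccsSolve col col2 panelty currdata lo hi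
      = (((currdata.drop lo).take (hi - lo)).map (ccsContrib col col2 panelty)).sum := by
  intro n
  induction n using Nat.strong_induction_on with
  | _ n ih =>
    intro lo hi hn hlen
    unfold ccsSolve
    by_cases h0 : hi ≤ lo
    · rw [if_pos h0]
      have : hi - lo = 0 := by omega
      simp [this]
    · rw [if_neg h0]
      by_cases h1 : hi = lo + 1
      · rw [if_pos h1]
        have hlo : lo < currdata.length := by omega
        have hdrop : currdata.drop lo = currdata[lo] :: currdata.drop (lo + 1) :=
          List.drop_eq_getElem_cons hlo
        have : hi - lo = 1 := by omega
        rw [this, hdrop]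
        simp only [List.take_succ_cons, List.take_zero, List.map_cons, List.map_nil,
          List.sum_cons, List.sum_nil, add_zero]
        simp only [ccsContrib, List.getD, List.getElem?_eq_getElem hlo, Option.getD_some]
      · rw [if_neg h1]
        have hmid1 : lo < (lo + hi) / 2 := by omega
        have hmid2 : (lo + hi) / 2 < hi := by omega
        rw [ih ((lo + hi) / 2 - lo) (by omega) lo ((lo + hi) / 2) rfl (by omega),
            ih (hi - (lo + hi) / 2) (by omega) ((lo + hi) / 2) hi rfl hlen]
        have hsplit : (currdata.drop lo).take (hi - lo)
            = (currdata.drop lo).take ((lo + hi) / 2 - lo)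
              ++ ((currdata.drop lo).drop ((lo + hi) / 2 - lo)).take (hi - (lo + hi) / 2) := by
          rw [← List.take_add]
          congr 1
          omega
        have hd : lo + ((lo + hi) / 2 - lo) = (lo + hi) / 2 := by omega
        rw [hsplit, List.drop_drop, hd, List.map_append, List.sum_append]

-- ===== VERDICT (by name: the statement is the Claim_ definition above) =====
theorem Count_Col_Score_spec : Claim_equal_Count_Col_Score := by
  intro col col2 panelty currdata _ _
  unfold Spec_Count_Col_Score Count_Col_Score Count_Col_Score_alt
  rw [count_col_score_foldl,
      ccsSolve_eq col col2 panelty currdata currdata.length 0 currdata.length rfl le_rfl]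
  simp
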